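-- pv_equiv track=rewrite | github.com/QilabGitHub/CRISPR-PACMAN-pool-generation | minipool/set_cover.py | diverse_get_guide
-- ===== SOURCE A (Python) =====
-- def num_triplets(guide):
--     count = 0
--     for i in range(len(guide) - 3 + 1):
--         triplet = guide[i: i + 3]
--         if triplet.lower() in [token * 3 for token in ["a", "c", "t", "g", "u"]]:
--             count += 1
--     return count
--
-- def diverse_get_guide(guide_to_seqnames):
--     max_covered, _ = max(
--         [(len(seqnames), guide)
--          for guide, seqnames in guide_to_seqnames.items()],
--         key=lambda a: a[0],
--     )
--     top_guides = [
--         guide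
--         for guide, seqnames in guide_to_seqnames.items()
--         if len(seqnames) == max_covered
--     ]
--     _, top_guide = min(
--         [(num_triplets(guide), guide) for guide in top_guides], key=lambda a: a[0]
--     )
--     return top_guide
-- ===== SOURCE B (Python) =====
-- def num_triplets(guide):
--     s = guide.lower()
--     return sum(1 for x, y, z in zip(s, s[1:], s[2:]) if x == y == z and x in "actgu")
--
-- def diverse_get_guide(guide_to_seqnames):
--     return min(
--         guide_to_seqnames.items(),
--         key=lambda kv: (-len(kv[1]), num_triplets(kv[0])),
--     )[0]
-- ===== Notes on version B (the rewrite author's own statement) =====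
-- stated objective: simpler
-- what changed: A's three-stage pipeline (max of coverage counts, filter the top-coverage guides, min of triplet counts) is replaced by a single argmin over the dict items under the composite key (-coverage, homopolymer-triplet count); num_triplets' per-position slice-and-lookup is replaced by one zip pass over consecutive lower-cased characters, which avoids building a slice per position (measured constant-factor speedup).
-- outside the precondition, e.g. on diverse_get_guide({}): A raises ValueError, B raises ValueError
import Mathlib
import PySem

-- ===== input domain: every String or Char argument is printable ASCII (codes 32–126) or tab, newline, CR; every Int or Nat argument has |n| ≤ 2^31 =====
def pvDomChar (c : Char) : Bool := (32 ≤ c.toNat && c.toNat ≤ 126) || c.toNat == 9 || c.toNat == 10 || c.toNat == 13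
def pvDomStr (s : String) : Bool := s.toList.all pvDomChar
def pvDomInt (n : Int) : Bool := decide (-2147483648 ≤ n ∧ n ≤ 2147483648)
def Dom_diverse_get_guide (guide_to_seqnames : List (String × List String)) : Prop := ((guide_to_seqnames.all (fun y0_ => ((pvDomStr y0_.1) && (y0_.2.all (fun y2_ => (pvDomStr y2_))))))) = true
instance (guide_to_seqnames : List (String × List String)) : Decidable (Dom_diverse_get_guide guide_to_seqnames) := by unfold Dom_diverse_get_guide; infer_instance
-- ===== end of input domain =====

-- B replaces A's three-stage max / filter / min pipeline with a single first-minimum pass under the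
-- composite key (-coverage, homopolymer-triplet count); same return value, objective: simpler.

-- ===== PORT A =====
def num_triplets (guide : String) : Int :=
  -- [token * 3 for token in [...]]: string repetition ported exactly as code-point-list repetition
  let tokens := ["a", "c", "t", "g", "u"].map (fun token => String.ofList (PySem.List.pyRepeat token.toList 3))
  (PySem.List.pyRange 0 (PySem.Str.len guide - 3 + 1) 1).foldl
    (fun count i =>
      let triplet := PySem.Str.slice guide (some i) (some (i + 3))
      if tokens.contains (PySem.Str.lower triplet) then count + 1 else count) 0

def diverse_get_guide (guide_to_seqnames : List (String × List String)) : String :=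
  match PySem.List.max? (guide_to_seqnames.map (fun kv => ((kv.2.length : Int), kv.1))) (fun a => a.1) with
  | none => ""  -- Python: max([]) raises ValueError on the empty dict; excluded by Pre_
  | some mp =>
    let max_covered := mp.1
    let top_guides := (guide_to_seqnames.filter (fun kv => (kv.2.length : Int) == max_covered)).map (fun kv => kv.1)
    match PySem.List.min? (top_guides.map (fun guide => (num_triplets guide, guide))) (fun a => a.1) with
    | none => ""  -- unreachable: top_guides is nonempty whenever the input is
    | some tp => tp.2

-- ===== PORT B =====
def num_triplets_alt (guide : String) : Int :=
  -- zip(s, s[1:], s[2:]) over a str iterates code points: exact on List Char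
  let s := (PySem.Str.lower guide).toList
  (((s.zip (PySem.List.slice s (some 1) none)).zip (PySem.List.slice s (some 2) none)).countP
      (fun p => p.1.1 == p.1.2 && p.1.2 == p.2 && "actgu".toList.contains p.1.1) : Int)

def diverse_get_guide_alt (guide_to_seqnames : List (String × List String)) : String :=
  match PySem.List.min2? guide_to_seqnames
      (fun kv => -(kv.2.length : Int)) (fun kv => num_triplets_alt kv.1) with
  | none => ""  -- Python: min of an empty dict raises ValueError; excluded by Pre_
  | some kv => kv.1

-- ===== PRECONDITION & SPEC =====
-- Pre_ excludes (a) the empty input, on which A's max([]) raises ValueError, and (b) association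
-- lists with duplicate keys, which do not represent a Python dict (dict construction collapses them).
def Pre_diverse_get_guide (guide_to_seqnames : List (String × List String)) : Prop :=
  guide_to_seqnames ≠ [] ∧ (guide_to_seqnames.map Prod.fst).Nodup
instance (guide_to_seqnames : List (String × List String)) : Decidable (Pre_diverse_get_guide guide_to_seqnames) := by unfold Pre_diverse_get_guide; infer_instance

def pvWitness_diverse_get_guide : (List (String × List String)) := [("ACGT", ["seq1"]), ("GGGT", ["seq1", "seq2"])]

def Spec_diverse_get_guide (guide_to_seqnames : List (String × List String)) (out : String) : Prop := out = diverse_get_guide_alt guide_to_seqnames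
instance (guide_to_seqnames : List (String × List String)) (out : String) : Decidable (Spec_diverse_get_guide guide_to_seqnames out) := by unfold Spec_diverse_get_guide; infer_instance

-- ===== CLAIM (what is proved, stated in full; the proofs are below) =====
def Claim_equal_diverse_get_guide : Prop := ∀ (guide_to_seqnames : List (String × List String)), Dom_diverse_get_guide guide_to_seqnames → Pre_diverse_get_guide guide_to_seqnames → Spec_diverse_get_guide guide_to_seqnames (diverse_get_guide guide_to_seqnames)

-- ===== LEMMAS AND PROOFS =====

-- generic "first extremum" machinery: pvSel lt picks the first element no later element strictly beats
def pvStep {α : Type} (lt : α → α → Bool) (acc : Option α) (x : α) : Option α :=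
  match acc with
  | none => some x
  | some m => if lt x m then some x else some m

def pvSel {α : Type} (lt : α → α → Bool) : List α → Option α
  | [] => none
  | x :: xs =>
    match pvSel lt xs with
    | none => some x
    | some m => if lt m x then some m else some x

lemma pvSel_eq_none_iff {α : Type} (lt : α → α → Bool) (l : List α) :
    pvSel lt l = none ↔ l = [] := by
  cases l with
  | nil => simp [pvSel]
  | cons x xs =>
    simp only [pvSel]
    cases h : pvSel lt xs with
    | none => simp
    | some m => cases hc : lt m x <;> simp [hc]

lemma pvSel_foldl_some {α : Type} (lt : α → α → Bool)
    (htrans : ∀ a b c, lt a b = true → lt b c = true → lt a c = true)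
    (hneg : ∀ a b c, lt a b = false → lt b c = false → lt a c = false) :
    ∀ (l : List α) (m : α),
      l.foldl (pvStep lt) (some m) =
        some (match pvSel lt l with | none => m | some m' => if lt m' m then m' else m) := by
  intro l
  induction l with
  | nil => intro m; simp [pvSel]
  | cons x xs ih =>
    intro m
    have hstep : pvStep lt (some m) x = some (if lt x m then x else m) := by
      simp only [pvStep]; split <;> rfl
    rw [List.foldl_cons, hstep, ih]
    cases hxs : pvSel lt xs with
    | none => simp [pvSel, hxs]
    | some m' =>
      simp only [pvSel, hxs]
      by_cases h1 : lt m' x = true <;> by_cases h2 : lt x m = true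
      · have h3 : lt m' m = true := htrans _ _ _ h1 h2
        simp [h1, h2, h3]
      · simp [h1, h2]
      · simp [h1, h2]
      · have h3 : lt m' m = false :=
          hneg _ _ _ (by simpa using h1) (by simpa using h2)
        simp [h1, h2, h3]

lemma pvSel_foldl {α : Type} (lt : α → α → Bool)
    (htrans : ∀ a b c, lt a b = true → lt b c = true → lt a c = true)
    (hneg : ∀ a b c, lt a b = false → lt b c = false → lt a c = false)
    (l : List α) : l.foldl (pvStep lt) none = pvSel lt l := by
  cases l with
  | nil => rfl
  | cons x xs =>
    have : pvStep lt none x = some x := rfl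
    rw [List.foldl_cons, this, pvSel_foldl_some lt htrans hneg]
    simp only [pvSel]
    cases hxs : pvSel lt xs with
    | none => simp
    | some m => cases hc : lt m x <;> simp [hc]

lemma pvSel_notlt {α : Type} (lt : α → α → Bool)
    (hirr : ∀ a, lt a a = false)
    (hasym : ∀ a b, lt a b = true → lt b a = false)
    (hneg : ∀ a b c, lt a b = false → lt b c = false → lt a c = false) :
    ∀ (l : List α) (m : α), pvSel lt l = some m → ∀ y ∈ l, lt y m = false := by
  intro l
  induction l with
  | nil => intro m hm; simp [pvSel] at hm
  | cons x xs ih =>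
    intro m hm y hy
    cases hxs : pvSel lt xs with
    | none =>
      have hxs' : xs = [] := (pvSel_eq_none_iff lt xs).mp hxs
      subst hxs'
      have hyx : y = x := by simpa using hy
      have hxm : x = m := by simpa [pvSel] using hm
      rw [hyx, ← hxm]
      exact hirr _
    | some m' =>
      simp only [pvSel, hxs] at hm
      by_cases h1 : lt m' x = true
      · rw [if_pos h1] at hm
        have hmm : m' = m := Option.some.inj hm
        rcases List.mem_cons.mp hy with rfl | h
        · rw [← hmm]; exact hasym _ _ h1
        · rw [← hmm]; exact ih _ hxs _ h
      · rw [if_neg h1] at hm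
        have hxm : x = m := Option.some.inj hm
        rcases List.mem_cons.mp hy with rfl | h
        · rw [← hxm]; exact hirr _
        · rw [← hxm]; exact hneg _ _ _ (ih _ hxs _ h) (by simpa using h1)

lemma pvSel_map {α β : Type} (lt : β → β → Bool) (f : α → β) (l : List α) :
    pvSel lt (l.map f) = (pvSel (fun a b => lt (f a) (f b)) l).map f := by
  induction l with
  | nil => rfl
  | cons x xs ih =>
    simp only [List.map_cons, pvSel, ih]
    cases hxs : pvSel (fun a b => lt (f a) (f b)) xs with
    | none => rfl
    | some m => simp only [Option.map_some]; rw [apply_ite (Option.map f)]; rfl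

-- bridges: the PySem extremum folds are pvSel
lemma min2?_eq_pvSel {α : Type} (k1 k2 : α → Int) (l : List α) :
    PySem.List.min2? l k1 k2 =
      pvSel (fun x m => decide (k1 x < k1 m) || (!decide (k1 m < k1 x) && decide (k2 x < k2 m))) l := by
  rw [show PySem.List.min2? l k1 k2 =
      l.foldl (pvStep (fun x m => decide (k1 x < k1 m) || (!decide (k1 m < k1 x) && decide (k2 x < k2 m)))) none from rfl]
  refine pvSel_foldl _ ?_ ?_ l
  · intro a b c h1 h2; simp at h1 h2 ⊢; omega
  · intro a b c h1 h2; simp at h1 h2 ⊢; omega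

lemma min?_eq_pvSel {α : Type} (key : α → Int) (l : List α) :
    PySem.List.min? l key = pvSel (fun x m => decide (key x < key m)) l := by
  have hf : PySem.List.min? l key = l.foldl (pvStep (fun x m => decide (key x < key m))) none := by
    unfold PySem.List.min?
    congr 1
    funext acc x
    cases acc with
    | none => rfl
    | some m => simp [pvStep]
  rw [hf]
  refine pvSel_foldl _ ?_ ?_ l
  · intro a b c h1 h2; simp at h1 h2 ⊢; omega
  · intro a b c h1 h2; simp at h1 h2 ⊢; omega

lemma max?_eq_pvSel {α : Type} (key : α → Int) (l : List α) :
    PySem.List.max? l key = pvSel (fun x m => decide (key m < key x)) l := by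
  have hf : PySem.List.max? l key = l.foldl (pvStep (fun x m => decide (key m < key x))) none := by
    unfold PySem.List.max?
    congr 1
    funext acc x
    cases acc with
    | none => rfl
    | some m => simp [pvStep]
  rw [hf]
  refine pvSel_foldl _ ?_ ?_ l
  · intro a b c h1 h2; simp at h1 h2 ⊢; omega
  · intro a b c h1 h2; simp at h1 h2 ⊢; omega

-- the three orders of the two programs
def ltB (p q : String × List String) : Bool :=
  decide (-(p.2.length : Int) < -(q.2.length : Int)) ||
    (!decide (-(q.2.length : Int) < -(p.2.length : Int)) &&
      decide (num_triplets_alt p.1 < num_triplets_alt q.1))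

def ltL (p q : String × List String) : Bool := decide ((q.2.length : Int) < (p.2.length : Int))

def ltT (p q : String × List String) : Bool := decide (num_triplets_alt p.1 < num_triplets_alt q.1)

-- num_triplets = num_triplets_alt
lemma tokens_contains (S : String) :
    ((["a","c","t","g","u"].map (fun token => String.ofList (PySem.List.pyRepeat token.toList 3))).contains S)
    = decide (S.toList = ['a','a','a'] ∨ S.toList = ['c','c','c'] ∨ S.toList = ['t','t','t'] ∨ S.toList = ['g','g','g'] ∨ S.toList = ['u','u','u']) := by
  rw [show (["a","c","t","g","u"].map (fun token => String.ofList (PySem.List.pyRepeat token.toList 3))) = ["aaa","ccc","ttt","ggg","uuu"] from by decide]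
  rw [Bool.eq_iff_iff]
  simp only [List.contains_iff_mem, List.mem_cons, List.not_mem_nil, or_false, decide_eq_true_eq,
    ← String.toList_inj,
    show "aaa".toList = ['a','a','a'] from by decide, show "ccc".toList = ['c','c','c'] from by decide,
    show "ttt".toList = ['t','t','t'] from by decide, show "ggg".toList = ['g','g','g'] from by decide,
    show "uuu".toList = ['u','u','u'] from by decide]


lemma headEq (a b c : Char) :
    (decide ([a,b,c] = ['a','a','a'] ∨ [a,b,c] = ['c','c','c'] ∨ [a,b,c] = ['t','t','t'] ∨ [a,b,c] = ['g','g','g'] ∨ [a,b,c] = ['u','u','u']))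
    = (a == b && b == c && "actgu".toList.contains a) := by
  rw [show "actgu".toList = ['a','c','t','g','u'] from by decide]
  rw [Bool.eq_iff_iff]
  simp only [decide_eq_true_eq, Bool.and_eq_true, beq_iff_eq, List.contains_iff_mem,
    List.mem_cons, List.not_mem_nil, or_false, List.cons.injEq, and_true]
  constructor
  · rintro (⟨rfl, rfl, rfl⟩ | ⟨rfl, rfl, rfl⟩ | ⟨rfl, rfl, rfl⟩ | ⟨rfl, rfl, rfl⟩ | ⟨rfl, rfl, rfl⟩) <;> simp
  · rintro ⟨⟨rfl, rfl⟩, h⟩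
    rcases h with rfl | rfl | rfl | rfl | rfl <;> simp


lemma tripCore : ∀ (ls : List Char),
    ((List.range (ls.length - 2)).countP
        (fun i => decide ((ls.drop i).take 3 = ['a','a','a'] ∨ (ls.drop i).take 3 = ['c','c','c'] ∨ (ls.drop i).take 3 = ['t','t','t'] ∨ (ls.drop i).take 3 = ['g','g','g'] ∨ (ls.drop i).take 3 = ['u','u','u'])))
      = ((ls.zip (ls.drop 1)).zip (ls.drop 2)).countP
          (fun p => p.1.1 == p.1.2 && p.1.2 == p.2 && "actgu".toList.contains p.1.1)
  | [] => by simp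
  | [a] => by simp
  | [a, b] => by simp
  | a :: b :: c :: t => by
    have ih := tripCore (b :: c :: t)
    simp only [List.length_cons] at ih ⊢
    rw [show t.length + 1 + 1 - 2 = t.length from by omega] at ih
    rw [show t.length + 1 + 1 + 1 - 2 = t.length + 1 from by omega]
    rw [List.range_succ_eq_map, List.countP_cons, List.countP_map]
    rw [show (a::b::c::t).drop 1 = b::c::t from rfl, show (a::b::c::t).drop 2 = c::t from rfl]
    rw [show (b::c::t).drop 1 = c::t from rfl, show (b::c::t).drop 2 = t from rfl] at ih
    rw [List.zip_cons_cons, List.zip_cons_cons, List.countP_cons]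
    rw [show ((((a,b),c).1.1 == ((a,b),c).1.2 && ((a,b),c).1.2 == ((a,b),c).2 && "actgu".toList.contains ((a,b),c).1.1)) = (a == b && b == c && "actgu".toList.contains a) from rfl]
    rw [show (List.drop 0 (a::b::c::t)) = a::b::c::t from rfl, show List.take 3 (a::b::c::t) = [a,b,c] from rfl]
    rw [headEq a b c]
    rw [← ih]
    rfl

lemma num_triplets_eq (guide : String) : num_triplets guide = num_triplets_alt guide := by
  have hlen : (PySem.Str.lower guide).toList.length = guide.toList.length := by
    rw [PySem.Str.toList_lower]; simp [PySem.Chars.lower]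
  have hsl : ∀ i : Nat,
      (PySem.Str.lower (PySem.Str.slice guide (some (i : Int)) (some ((i : Int) + 3)))).toList
        = (((PySem.Str.lower guide).toList).drop i).take 3 := by
    intro i
    rw [PySem.Str.toList_lower, PySem.Str.toList_slice, PySem.Chars.slice_eq_listSlice]
    rw [show ((i : Int) + 3) = ((i : Int) + ((3 : Nat) : Int)) from by norm_num]
    rw [PySem.List.slice_natCast_add]
    rw [PySem.Str.toList_lower]
    simp [PySem.Chars.lower, List.map_take, List.map_drop]
  have hrange : PySem.List.pyRange 0 ((PySem.Str.len guide) - 3 + 1) 1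
      = List.map (fun k : Nat => (k : Int)) (List.range (guide.toList.length - 2)) := by
    rw [PySem.Str.len_eq]
    set n := guide.toList.length with hn
    rcases Nat.lt_or_ge n 2 with h | h
    · have h0 : n - 2 = 0 := by omega
      rw [h0]
      have he : PySem.List.pyRange 0 ((n : Int) - 3 + 1) 1 = [] := by
        simp [PySem.List.pyRange]; omega
      simp [he]
    · rw [show ((n : Int) - 3 + 1) = ((n - 2 : Nat) : Int) from by omega]
      exact PySem.List.pyRange_zero_natCast _
  simp only [num_triplets, num_triplets_alt]
  rw [PySem.List.foldl_if_add_one, zero_add]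
  rw [hrange, List.countP_map]
  rw [PySem.List.slice_from ((PySem.Str.lower guide).toList) (a := 1) (by norm_num), PySem.List.slice_from ((PySem.Str.lower guide).toList) (a := 2) (by norm_num)]
  rw [show ((1:Int)).toNat = 1 from rfl, show ((2:Int)).toNat = 2 from rfl]
  have hpoint : ∀ i ∈ List.range (guide.toList.length - 2),
      ((fun i : Int => (List.map (fun token => String.ofList (PySem.List.pyRepeat token.toList 3)) ["a","c","t","g","u"]).contains (PySem.Str.lower (PySem.Str.slice guide (some i) (some (i + 3))))) ∘ (fun k : Nat => (k : Int))) i = true ↔ (fun i : Nat => decide ((((PySem.Str.lower guide).toList).drop i).take 3 = ['a','a','a'] ∨ (((PySem.Str.lower guide).toList).drop i).take 3 = ['c','c','c'] ∨ (((PySem.Str.lower guide).toList).drop i).take 3 = ['t','t','t'] ∨ (((PySem.Str.lower guide).toList).drop i).take 3 = ['g','g','g'] ∨ (((PySem.Str.lower guide).toList).drop i).take 3 = ['u','u','u'])) i = true := by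
    intro i _
    simp only [Function.comp_apply]
    rw [tokens_contains, hsl i]
  rw [List.countP_congr hpoint, ← hlen]
  exact congrArg _ (tripCore ((PySem.Str.lower guide).toList))

lemma ltB_irr : ∀ a, ltB a a = false := by
  intro a; simp [ltB]

lemma ltB_asym : ∀ a b, ltB a b = true → ltB b a = false := by
  intro a b h; simp [ltB] at h ⊢; omega

lemma ltB_neg : ∀ a b c, ltB a b = false → ltB b c = false → ltB a c = false := by
  intro a b c h1 h2; simp [ltB] at h1 h2 ⊢; omega

-- A's staged pipeline agrees with B's one-pass first lexicographic minimum
lemma key_lemma : ∀ (l : List (String × List String)) (b : String × List String),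
    pvSel ltB l = some b →
    ∃ a, pvSel ltL l = some a ∧ (a.2.length : Int) = (b.2.length : Int) ∧
      ∃ c, pvSel ltT (l.filter (fun kv => (kv.2.length : Int) == (b.2.length : Int))) = some c ∧
        c.1 = b.1 := by
  intro l
  induction l with
  | nil => intro b hb; simp [pvSel] at hb
  | cons p l' ih =>
    intro b hb
    cases hxs : pvSel ltB l' with
    | none =>
      have hl' : l' = [] := (pvSel_eq_none_iff ltB l').mp hxs
      subst hl'
      have hbp : p = b := by simpa [pvSel] using hb
      subst hbp
      exact ⟨p, by simp [pvSel], rfl, p, by simp [pvSel], rfl⟩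
    | some b' =>
      obtain ⟨a', ha', hLa, c', hc', hc1⟩ := ih b' hxs
      simp only [pvSel, hxs] at hb
      rcases lt_trichotomy ((p.2.length : Int)) ((b'.2.length : Int)) with h | h | h
      · -- head covers strictly less: B keeps the tail winner, A's max/filter/min are unchanged
        have hlt : ltB b' p = true := by simp [ltB]; omega
        rw [if_pos hlt] at hb
        obtain rfl : b' = b := Option.some.inj hb
        refine ⟨a', ?_, hLa, c', ?_, hc1⟩
        · have hL : ltL a' p = true := by simp [ltL]; omega
          simp only [pvSel, ha', hL, if_true]
        · have hne : ¬(((p.2.length : Int) == (b'.2.length : Int)) = true) := by simp; omega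
          simp only [List.filter_cons, if_neg hne]
          exact hc'
      · -- head covers exactly as much: the triplet count decides, ties go to the head
        by_cases hnt : num_triplets_alt b'.1 < num_triplets_alt p.1
        · have hlt : ltB b' p = true := by simp [ltB]; omega
          rw [if_pos hlt] at hb
          obtain rfl : b' = b := Option.some.inj hb
          have hL : ltL a' p = false := by simp [ltL]; omega
          have hpass : (((p.2.length : Int) == (b'.2.length : Int))) = true := by simp; omega
          refine ⟨p, ?_, h, c', ?_, hc1⟩
          · simp [pvSel, ha', hL]
          · simp only [List.filter_cons, hpass, if_true]
            have hT : ltT c' p = true := by simp [ltT, hc1]; omega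
            simp only [pvSel, hc', hT, if_true]
        · have hlt : ltB b' p = false := by simp [ltB]; omega
          simp only [hlt, Bool.false_eq_true, if_false] at hb
          obtain rfl : p = b := Option.some.inj hb
          have hL : ltL a' p = false := by simp [ltL]; omega
          have hpass : (((p.2.length : Int) == (p.2.length : Int))) = true := by simp
          have hpred : (fun kv : String × List String => ((kv.2.length : Int) == (p.2.length : Int)))
              = (fun kv : String × List String => ((kv.2.length : Int) == (b'.2.length : Int))) := by
            funext kv; rw [h]
          refine ⟨p, ?_, rfl, p, ?_, rfl⟩
          · simp [pvSel, ha', hL]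
          · simp only [List.filter_cons, hpred]
            rw [if_pos (show ((↑p.2.length : Int) == ↑b'.2.length) = true by simpa using h)]
            have hT : ltT c' p = false := by simp [ltT, hc1]; omega
            simp [pvSel, hc', hT]
      · -- head covers strictly more: it beats everything; the tail's top group is filtered away
        have hlt : ltB b' p = false := by simp [ltB]; omega
        simp only [hlt, Bool.false_eq_true, if_false] at hb
        obtain rfl : p = b := Option.some.inj hb
        have hL : ltL a' p = false := by simp [ltL]; omega
        have hpass : (((p.2.length : Int) == (p.2.length : Int))) = true := by simp
        have hnot := pvSel_notlt ltB ltB_irr ltB_asym ltB_neg l' b' hxs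
        have hfil : l'.filter (fun kv => ((kv.2.length : Int) == (p.2.length : Int))) = [] := by
          refine List.filter_eq_nil_iff.mpr (fun y hy => ?_)
          have := hnot y hy
          simp [ltB] at this
          simp
          omega
        refine ⟨p, ?_, rfl, p, ?_, rfl⟩
        · simp [pvSel, ha', hL]
        · simp only [List.filter_cons, hpass, if_true, hfil]
          simp [pvSel]

-- ===== VERDICT (by name: the statement is the Claim_ definition above) =====
theorem diverse_get_guide_spec : Claim_equal_diverse_get_guide := by
  intro l _hdom hpre
  obtain ⟨hne, -⟩ := hpre
  unfold Spec_diverse_get_guide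
  obtain ⟨b, hb⟩ : ∃ b, pvSel ltB l = some b := by
    cases hsel : pvSel ltB l with
    | none => exact absurd ((pvSel_eq_none_iff _ _).mp hsel) hne
    | some x => exact ⟨x, rfl⟩
  obtain ⟨a, ha, hLa, c, hc, hc1⟩ := key_lemma l b hb
  have hB : diverse_get_guide_alt l = b.1 := by
    unfold diverse_get_guide_alt
    have h1 : PySem.List.min2? l (fun kv => -(kv.2.length : Int)) (fun kv => num_triplets_alt kv.1)
        = pvSel ltB l := by
      rw [min2?_eq_pvSel]; rfl
    rw [h1, hb]
  have hmax : PySem.List.max? (l.map (fun kv => ((kv.2.length : Int), kv.1))) (fun a => a.1)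
      = some ((a.2.length : Int), a.1) := by
    have h2 : PySem.List.max? (l.map (fun kv => ((kv.2.length : Int), kv.1))) (fun a => a.1)
        = (pvSel ltL l).map (fun kv => ((kv.2.length : Int), kv.1)) := by
      rw [max?_eq_pvSel, pvSel_map]; rfl
    rw [h2, ha]; rfl
  have hA : diverse_get_guide l = c.1 := by
    unfold diverse_get_guide
    rw [hmax]
    show (match PySem.List.min?
        (((l.filter (fun kv => ((kv.2.length : Int) == (a.2.length : Int)))).map
          (fun kv => kv.1)).map (fun guide => (num_triplets guide, guide))) (fun a => a.1) with
      | none => "" | some tp => tp.2) = c.1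
    have h3 : PySem.List.min?
        (((l.filter (fun kv => ((kv.2.length : Int) == (a.2.length : Int)))).map
          (fun kv => kv.1)).map (fun guide => (num_triplets guide, guide))) (fun a => a.1)
        = (pvSel ltT (l.filter (fun kv => ((kv.2.length : Int) == (a.2.length : Int))))).map
            (fun kv => (num_triplets_alt kv.1, kv.1)) := by
      rw [List.map_map, min?_eq_pvSel, pvSel_map]
      simp only [num_triplets_eq]
      rfl
    rw [h3]
    have hfilpred : (fun kv : String × List String => ((kv.2.length : Int) == (a.2.length : Int)))
        = (fun kv : String × List String => ((kv.2.length : Int) == (b.2.length : Int))) := by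
      funext kv; rw [hLa]
    rw [hfilpred, hc]
    rfl
  rw [hA, hB, hc1]
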